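-- pv_equiv track=rewrite | github.com/monarch-of-war/Kainotes | scripts/generate_pdf.py | markdown_to_paragraphs
-- ===== SOURCE A (Python) =====
-- def markdown_to_paragraphs(md_text):
--     """Very small markdown -> paragraphs converter: handles headers and paragraphs."""
--     lines = [l.rstrip() for l in md_text.splitlines()]
--     paras = []
--     cur = []
--
--     def flush():
--         if cur:
--             paras.append('\n'.join(cur))
--             cur.clear()
--
--     for line in lines:
--         if not line.strip():
--             flush()
--             continue
--         if line.startswith('#'):
--             flush()
--             # represent header as paragraph with bold style later
--             paras.append(line)
--         else:
--             cur.append(line)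
--     flush()
--     return paras
-- ===== SOURCE B (Python) =====
-- def markdown_to_paragraphs(md_text):
--     """Recursive run-splitting: take whole paragraph runs at once instead of
--     buffering lines one at a time."""
--     lines = [l.rstrip() for l in md_text.splitlines()]
--     return _paras(lines)
--
--
-- def _paras(lines):
--     if not lines:
--         return []
--     head = lines[0]
--     if not head.strip():
--         return _paras(lines[1:])
--     if head.startswith('#'):
--         return [head] + _paras(lines[1:])
--     i = 1
--     while i < len(lines) and lines[i].strip() and not lines[i].startswith('#'):
--         i += 1
--     return ['\n'.join(lines[:i])] + _paras(lines[i:])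
-- ===== Notes on version B (the rewrite author's own statement) =====
-- stated objective: alternative
-- what changed: Replaced A's single pass with a mutable line buffer and flush() closure by a recursive run-splitter that consumes a maximal run of body lines at once and joins each run in one step.
import Mathlib
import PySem

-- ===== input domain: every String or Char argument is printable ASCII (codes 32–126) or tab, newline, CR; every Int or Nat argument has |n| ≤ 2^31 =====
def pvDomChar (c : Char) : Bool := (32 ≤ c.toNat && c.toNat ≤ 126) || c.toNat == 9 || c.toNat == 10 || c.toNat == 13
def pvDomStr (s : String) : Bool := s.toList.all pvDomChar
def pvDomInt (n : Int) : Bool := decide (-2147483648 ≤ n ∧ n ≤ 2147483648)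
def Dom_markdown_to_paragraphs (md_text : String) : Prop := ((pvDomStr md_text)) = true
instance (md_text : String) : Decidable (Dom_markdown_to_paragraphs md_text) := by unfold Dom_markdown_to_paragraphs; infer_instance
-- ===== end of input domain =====

-- B replaces A's line-by-line 'cur' buffer + flush() with a recursive run-splitter
-- that takes each maximal run of body lines at once (alternative decomposition, same cost).

-- ===== PORT A =====
-- A's loop state: (paras, cur); flush() appends '\n'.join(cur) when cur is nonempty.
def pvFlushA (paras cur : List String) : List String :=
  if cur ≠ [] then paras ++ [PySem.Str.join "\n" cur] else paras

def pvStepA (st : List String × List String) (line : String) : List String × List String :=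
  if PySem.Str.strip line = "" then (pvFlushA st.1 st.2, [])
  else if PySem.Str.startswith line "#" then (pvFlushA st.1 st.2 ++ [line], [])
  else (st.1, st.2 ++ [line])

def markdown_to_paragraphs (md_text : String) : List String :=
  let lines := (PySem.Str.splitlines md_text).map PySem.Str.rstrip
  let st := lines.foldl pvStepA ([], [])
  pvFlushA st.1 st.2

-- ===== PORT B =====
-- body-line predicate of the while loop: lines[i].strip() and not lines[i].startswith('#')
def pvBodyB (l : String) : Bool := PySem.Str.strip l != "" && !PySem.Str.startswith l "#"

def pvParasB : List String → List String
  | [] => []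
  | head :: rest =>
    if PySem.Str.strip head = "" then pvParasB rest
    else if PySem.Str.startswith head "#" then head :: pvParasB rest
    else
      PySem.Str.join "\n" (head :: rest.takeWhile pvBodyB) ::
        pvParasB (rest.dropWhile pvBodyB)
termination_by l => l.length
decreasing_by
  · simp
  · simp
  · exact Nat.lt_succ_of_le (List.length_dropWhile_le _ _)

def markdown_to_paragraphs_alt (md_text : String) : List String :=
  pvParasB ((PySem.Str.splitlines md_text).map PySem.Str.rstrip)

-- ===== PRECONDITION & SPEC =====
def Spec_markdown_to_paragraphs (md_text : String) (out : List String) : Prop := out = markdown_to_paragraphs_alt md_text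
instance (md_text : String) (out : List String) : Decidable (Spec_markdown_to_paragraphs md_text out) := by unfold Spec_markdown_to_paragraphs; infer_instance

-- ===== CLAIM (what is proved, stated in full; the proofs are below) =====
def Claim_equal_markdown_to_paragraphs : Prop := ∀ (md_text : String), Dom_markdown_to_paragraphs md_text → Spec_markdown_to_paragraphs md_text (markdown_to_paragraphs md_text)

-- ===== LEMMAS AND PROOFS =====

-- B's recursion with a pending buffer, the closed-form bridge between the two.
def pvParasC (cur lines : List String) : List String :=
  if cur = [] then pvParasB lines
  else PySem.Str.join "\n" (cur ++ lines.takeWhile pvBodyB) ::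
        pvParasB (lines.dropWhile pvBodyB)

theorem pvFoldA_eq_pvParasC (lines : List String) :
    ∀ (paras cur : List String),
      (let st := lines.foldl pvStepA (paras, cur); pvFlushA st.1 st.2)
        = paras ++ pvParasC cur lines := by
  induction lines with
  | nil =>
    intro paras cur
    simp only [List.foldl_nil, pvParasC, pvFlushA, List.takeWhile_nil, List.dropWhile_nil,
      List.append_nil]
    by_cases h : cur = [] <;> simp [h, pvParasB]
  | cons l ls ih =>
    intro paras cur
    simp only [List.foldl_cons, pvStepA]
    by_cases hb : PySem.Str.strip l = ""
    · -- blank line: flush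
      simp only [hb, if_pos rfl, ih]
      have hp : pvBodyB l = false := by simp [pvBodyB, hb]
      by_cases hc : cur = []
      · subst hc
        simp [pvParasC, pvFlushA, pvParasB, hb]
      · simp [pvParasC, hc, pvFlushA, hp, pvParasB, hb, List.append_assoc]
    · by_cases hh : PySem.Str.startswith l "#"
      all_goals simp at hh
      · -- header line: flush then emit
        simp only [hb, hh, if_false, if_true, ih, Bool.true_eq]
        have hp : pvBodyB l = false := by simp [pvBodyB, hh]
        have hB : pvParasB (l :: ls) = l :: pvParasB ls := by
          rw [pvParasB]; simp [hb, hh]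
        by_cases hc : cur = []
        · subst hc; simp [pvParasC, pvFlushA, hB, hh]
        · simp [pvParasC, hc, pvFlushA, hp, hB, hh, List.append_assoc]
      · -- body line: accumulate
        simp only [hb, hh, if_false, ih, Bool.false_eq_true]
        have hp : pvBodyB l = true := by simp [pvBodyB, hb, hh]
        have hB : pvParasB (l :: ls)
            = PySem.Str.join "\n" (l :: ls.takeWhile pvBodyB) ::
                pvParasB (ls.dropWhile pvBodyB) := by
          rw [pvParasB]; simp [hb, hh]
        by_cases hc : cur = []
        · subst hc; simp [pvParasC, List.takeWhile_cons, List.dropWhile_cons, hp, hB, hh]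
        · have hc' : cur ++ [l] ≠ [] := by simp
          simp [pvParasC, hc, hc', List.takeWhile_cons, List.dropWhile_cons, hp, hh,
            List.append_assoc]

-- ===== VERDICT (by name: the statement is the Claim_ definition above) =====
theorem markdown_to_paragraphs_spec : Claim_equal_markdown_to_paragraphs := by
  intro md _
  unfold Spec_markdown_to_paragraphs markdown_to_paragraphs markdown_to_paragraphs_alt
  simpa [pvParasC] using
    pvFoldA_eq_pvParasC ((PySem.Str.splitlines md).map PySem.Str.rstrip) [] []
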